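-- pv_equiv track=rewrite | github.com/imulan/procon | yukicoder/423.py | num_to_ham
-- ===== SOURCE A (Python) =====
-- def num_to_ham(num):
--     s=''
--     while True:
--         if num%2==0:
--             s = '0'+s
--         else:
--             s = '1'+s
--
--         num = num//2
--         if num == 0:
--             break
--
--     ret=''
--     for c in s:
--         if c == '0':
--             ret = ret+'ham'
--         else:
--             ret = ret+'hamu'
--
--     return ret
-- ===== SOURCE B (Python) =====
-- def num_to_ham(num):
--     piece = 'ham' if num % 2 == 0 else 'hamu'
--     q = num // 2
--     return piece if q == 0 else num_to_ham(q) + piece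
-- ===== Notes on version B (the rewrite author's own statement) =====
-- stated objective: simpler
-- what changed: Single recursion over num//2 that emits 'ham'/'hamu' directly while descending, replacing A's two sequential passes (build a '0'/'1' string, then map it).
import Mathlib
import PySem

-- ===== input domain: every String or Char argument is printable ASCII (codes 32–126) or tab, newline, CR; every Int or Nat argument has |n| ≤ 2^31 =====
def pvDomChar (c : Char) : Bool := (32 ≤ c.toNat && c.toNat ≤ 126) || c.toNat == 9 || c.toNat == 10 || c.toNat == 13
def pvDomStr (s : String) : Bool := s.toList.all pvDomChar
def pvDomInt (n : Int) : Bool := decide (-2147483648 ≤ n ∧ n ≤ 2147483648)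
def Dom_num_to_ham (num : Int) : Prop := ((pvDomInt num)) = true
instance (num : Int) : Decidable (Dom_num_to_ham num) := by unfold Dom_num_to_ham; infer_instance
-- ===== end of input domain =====

-- B replaces A's two sequential passes (build a '0'/'1' string, then map it) by one
-- recursion over num//2 that emits 'ham'/'hamu' directly: simpler, one descent.


-- ===== PORT A =====
-- the 'while True' loop: prepend the bit character, divide, break when num//2 == 0.
-- (the '0 < q' guard is the totality guard: for q < 0 — unreachable inside Pre_ —
-- the Python loop never terminates)
def pvALoop (num : Int) (s : List Char) : List Char :=
  let s' := if PySem.Int.mod num 2 = 0 then '0' :: s else '1' :: s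
  let q := PySem.Int.floordiv num 2
  if h : 0 < q then pvALoop q s' else s'
termination_by num.toNat
decreasing_by
  have hq := PySem.Int.floordiv_mul_add_mod num 2
  have h1 := PySem.Int.mod_nonneg num (by norm_num : (0:Int) < 2)
  have h2 := PySem.Int.mod_lt num (by norm_num : (0:Int) < 2)
  omega

-- the 'for c in s' pass mapping '0'→'ham', other→'hamu'
def pvRender (s : List Char) (ret : List Char) : List Char :=
  match s with
  | [] => ret
  | c :: cs => pvRender cs (ret ++ if c = '0' then "ham".toList else "hamu".toList)

def num_to_ham (num : Int) : String := String.mk (pvRender (pvALoop num []) [])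

-- ===== PORT B =====
-- (same totality guard: for q < 0 the Python recursion never bottoms out; outside Pre_)
def pvAltChars (num : Int) : List Char :=
  let piece := if PySem.Int.mod num 2 = 0 then "ham".toList else "hamu".toList
  let q := PySem.Int.floordiv num 2
  if h : 0 < q then pvAltChars q ++ piece else piece
termination_by num.toNat
decreasing_by
  have hq := PySem.Int.floordiv_mul_add_mod num 2
  have h1 := PySem.Int.mod_nonneg num (by norm_num : (0:Int) < 2)
  have h2 := PySem.Int.mod_lt num (by norm_num : (0:Int) < 2)
  omega

def num_to_ham_alt (num : Int) : String := String.mk (pvAltChars num)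

-- ===== PRECONDITION & SPEC =====
-- Pre_ excludes negative num: there A's while-loop never terminates (num//2 stalls at -1)
-- and B's recursion raises RecursionError.
def Pre_num_to_ham (num : Int) : Prop := 0 ≤ num
instance (num : Int) : Decidable (Pre_num_to_ham num) := by unfold Pre_num_to_ham; infer_instance
def pvWitness_num_to_ham : Int := (5)
def Spec_num_to_ham (num : Int) (out : String) : Prop := out = num_to_ham_alt num
instance (num : Int) (out : String) : Decidable (Spec_num_to_ham num out) := by unfold Spec_num_to_ham; infer_instance

-- ===== CLAIM =====
def Claim_equal_num_to_ham : Prop := ∀ (num : Int), Dom_num_to_ham num → Pre_num_to_ham num → Spec_num_to_ham num (num_to_ham num)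

-- ===== LEMMAS AND PROOFS =====
theorem pvRender_acc (s : List Char) (ret : List Char) :
    pvRender s ret = ret ++ pvRender s [] := by
  induction s generalizing ret with
  | nil => simp [pvRender]
  | cons c cs ih =>
      rw [pvRender, pvRender, ih, ih (([]:List Char) ++ _)]
      simp

theorem pvRender_cons (c : Char) (s : List Char) :
    pvRender (c :: s) [] = (if c = '0' then "ham".toList else "hamu".toList) ++ pvRender s [] := by
  rw [pvRender, pvRender_acc]; simp

theorem pvMain (num : Int) (hnum : 0 ≤ num) (s : List Char) :
    pvRender (pvALoop num s) [] = pvAltChars num ++ pvRender s [] := by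
  have h2 : (0:Int) < 2 := by norm_num
  induction hn : num.toNat using Nat.strong_induction_on generalizing num s with
  | _ n ih =>
    have hq := PySem.Int.floordiv_mul_add_mod num 2
    have hm1 := PySem.Int.mod_nonneg num h2
    have hm2 := PySem.Int.mod_lt num h2
    rw [pvALoop, pvAltChars]
    by_cases hg : 0 < PySem.Int.floordiv num 2
    · simp only [hg, dite_true]
      rw [ih (PySem.Int.floordiv num 2).toNat (by omega) _ (by omega) _ rfl]
      by_cases hmod : (2:Int) ∣ num <;>
        simp [hmod, pvRender_cons]
    · simp only [hg, dite_false]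
      by_cases hmod : (2:Int) ∣ num <;>
        simp [hmod, pvRender_cons]

-- ===== VERDICT =====
theorem num_to_ham_spec : Claim_equal_num_to_ham := by
  intro num _ hpre
  unfold Spec_num_to_ham num_to_ham num_to_ham_alt
  rw [pvMain num hpre []]
  simp [pvRender]
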